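-- pv_equiv track=rewrite | github.com/fbrizu/AdventOfCode | 2016/13.py | isWall
-- ===== SOURCE A (Python) =====
-- input = 1358
--
-- def isWall(x,y):
--     n = x*x + 3*x + 2*x*y + y + y*y + input
--     b = '{0:b}'.format(n)
--     count = 0
--     for c in b:
--         if c == '1':
--             count += 1
--     return count % 2 == 1
-- ===== SOURCE B (Python) =====
-- input = 1358
--
-- def isWall(x, y):
--     n = abs(x*x + 3*x + 2*x*y + y + y*y + input)
--     parity = False
--     while n:
--         parity = not parity
--         n &= n - 1
--     return parity
-- ===== Notes on version B (the rewrite author's own statement) =====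
-- stated objective: alternative
-- what changed: B uses Kernighan's bit trick (n &= n-1 clears one set bit per iteration) and toggles a boolean parity flag, instead of formatting n as a binary string and counting '1' characters.
import Mathlib
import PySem

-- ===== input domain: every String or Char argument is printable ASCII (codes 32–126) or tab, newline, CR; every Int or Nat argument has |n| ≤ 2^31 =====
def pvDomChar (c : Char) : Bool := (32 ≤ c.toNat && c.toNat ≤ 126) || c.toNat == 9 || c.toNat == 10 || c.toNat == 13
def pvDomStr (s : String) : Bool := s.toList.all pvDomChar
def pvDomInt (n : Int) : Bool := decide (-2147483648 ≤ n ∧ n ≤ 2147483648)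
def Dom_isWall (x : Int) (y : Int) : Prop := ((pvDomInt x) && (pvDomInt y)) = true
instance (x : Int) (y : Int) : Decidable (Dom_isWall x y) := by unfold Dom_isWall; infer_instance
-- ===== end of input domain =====

-- B replaces A's format-to-binary-string-and-count-'1'-characters with Kernighan's
-- bit trick (n &= n-1 removes one set bit per iteration) toggling a parity flag.

-- ===== PORT A =====
-- '{0:b}'.format(n): binary digits of |n| (no leading zeros; "0" for 0), '-' prefix if n < 0
def pvBinDigits : Nat → List Char
  | 0 => []
  | (m+1) => pvBinDigits ((m+1) / 2) ++ [if (m+1) % 2 = 1 then '1' else '0']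
decreasing_by exact Nat.div_lt_self (Nat.succ_pos m) (by norm_num)

def pvFormatB (n : Int) : List Char :=
  (if n < 0 then ['-'] else []) ++ (if n.natAbs = 0 then ['0'] else pvBinDigits n.natAbs)

def isWall (x : Int) (y : Int) : Bool :=
  let n := x*x + 3*x + 2*x*y + y + y*y + 1358
  let b := pvFormatB n
  let count := b.foldl (fun count c => if c = '1' then count + 1 else count) 0
  count % 2 == 1

-- ===== PORT B =====
-- while n: parity = not parity; n &= n - 1   (on the nonnegative |n|)
def pvKern (n : Nat) (p : Bool) : Bool :=
  if h : n = 0 then p else pvKern (n &&& (n - 1)) (!p)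
decreasing_by exact Nat.lt_of_le_of_lt Nat.and_le_right (Nat.pred_lt h)

def isWall_alt (x : Int) (y : Int) : Bool :=
  let n := (x*x + 3*x + 2*x*y + y + y*y + 1358).natAbs
  pvKern n false

-- ===== PRECONDITION & SPEC =====
def Spec_isWall (x : Int) (y : Int) (out : Bool) : Prop := out = isWall_alt x y
instance (x : Int) (y : Int) (out : Bool) : Decidable (Spec_isWall x y out) := by unfold Spec_isWall; infer_instance

-- ===== CLAIM (what is proved, stated in full; the proofs are below) =====
def Claim_equal_isWall : Prop := ∀ (x : Int) (y : Int), Dom_isWall x y → Spec_isWall x y (isWall x y)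

-- ===== LEMMAS AND PROOFS =====

-- popcount specification both sides are related to
def pvPc (m : Nat) : Nat :=
  if h : m = 0 then 0 else pvPc (m / 2) + m % 2
decreasing_by exact Nat.div_lt_self (Nat.pos_of_ne_zero h) one_lt_two

theorem pvPc_two_mul (j : Nat) : pvPc (2 * j) = pvPc j := by
  rcases Nat.eq_zero_or_pos j with h | h
  · simp [h]
  · rw [pvPc]
    have : ¬ (2 * j = 0) := by omega
    simp [this, Nat.mul_div_cancel_left j (by norm_num : 0 < 2), Nat.mul_mod_right]

theorem pvPc_two_mul_add_one (j : Nat) : pvPc (2 * j + 1) = pvPc j + 1 := by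
  rw [pvPc]
  have h2 : (2 * j + 1) / 2 = j := by omega
  have h3 : (2 * j + 1) % 2 = 1 := by omega
  simp [h2, h3]

-- Kernighan's step: n &&& (n-1) removes exactly one set bit
theorem pvPc_and_pred (k : Nat) (hk : 0 < k) : pvPc (k &&& (k - 1)) + 1 = pvPc k := by
  induction k using Nat.strong_induction_on with
  | _ k ih =>
    rcases Nat.even_or_odd k with ⟨j, hj⟩ | ⟨j, hj⟩
    · -- k = 2j, j > 0 : 2j &&& (2j-1) = 2*(j &&& (j-1))
      have hj0 : 0 < j := by omega
      have hbit : k &&& (k - 1) = 2 * (j &&& (j - 1)) := by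
        have h1 : k = Nat.bit false j := by simp [Nat.bit]; omega
        have h2 : k - 1 = Nat.bit true (j - 1) := by simp [Nat.bit]; omega
        rw [h2, h1, Nat.land_bit]
        simp [Nat.bit]
      rw [hbit, pvPc_two_mul, ih j (by omega) hj0,
          show k = 2 * j by omega, pvPc_two_mul]
    · -- k = 2j+1 : (2j+1) &&& 2j = 2j
      have hbit : k &&& (k - 1) = 2 * j := by
        have h1 : k = Nat.bit true j := by simp [Nat.bit]; omega
        have h2 : k - 1 = Nat.bit false j := by simp [Nat.bit]; omega
        rw [h2, h1, Nat.land_bit]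
        simp [Nat.bit]
      rw [hbit, pvPc_two_mul, hj, pvPc_two_mul_add_one]

theorem pvKern_eq (n : Nat) : ∀ p, pvKern n p = xor p (decide (pvPc n % 2 = 1)) := by
  induction n using Nat.strong_induction_on with
  | _ n ih =>
    intro p
    rw [pvKern]
    by_cases h : n = 0
    · simp [h, pvPc]
    · have hlt : n &&& (n - 1) < n :=
        Nat.lt_of_le_of_lt Nat.and_le_right (Nat.pred_lt h)
      rw [dif_neg h, ih _ hlt]
      have hpc := pvPc_and_pred n (Nat.pos_of_ne_zero h)
      by_cases hb : pvPc (n &&& (n - 1)) % 2 = 1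
      · have : pvPc n % 2 = 0 := by omega
        simp [hb, this]
      · have : pvPc n % 2 = 1 := by omega
        simp [hb, this]

theorem foldl_binDigits (m : Nat) : ∀ c,
    (pvBinDigits m).foldl (fun count ch => if ch = '1' then count + 1 else count) c
      = c + pvPc m := by
  induction m using Nat.strong_induction_on with
  | _ m ih =>
    intro c
    match m with
    | 0 => simp [pvBinDigits, pvPc]
    | (k+1) =>
      rw [pvBinDigits, List.foldl_append,
          ih ((k+1) / 2) (Nat.div_lt_self (Nat.succ_pos k) (by norm_num)) c]
      have hpc : pvPc (k+1) = pvPc ((k+1)/2) + (k+1) % 2 := by rw [pvPc]; simp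
      rw [hpc]
      by_cases hb : (k+1) % 2 = 1
      · simp [hb]; omega
      · have hb0 : (k+1) % 2 = 0 := by omega
        simp [hb0]

-- ===== VERDICT (by name: the statement is the Claim_ definition above) =====
theorem isWall_spec : Claim_equal_isWall := by
  intro x y _
  show isWall x y = isWall_alt x y
  unfold isWall isWall_alt pvFormatB
  set n := x*x + 3*x + 2*x*y + y + y*y + 1358 with hn
  rw [pvKern_eq]
  have hbeq : ∀ a : Nat, (a % 2 == 1) = decide (a % 2 = 1) := fun a => by
    by_cases h : a % 2 = 1 <;> simp [h]
  by_cases h0 : n.natAbs = 0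
  · have hz : n = 0 := Int.natAbs_eq_zero.mp h0
    simp [hz, pvPc]
  · by_cases hneg : n < 0
    · simp [hneg, h0, foldl_binDigits, hbeq]
    · simp [hneg, h0, foldl_binDigits, hbeq]
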